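-- pv_equiv track=rewrite | github.com/hecatechin/Python | hangman/drawhangman.py | drawhangman
-- ===== SOURCE A (Python) =====
-- def drawhangman(lefttime):
--     """
--     :param lefttime: the number of gesses left in the hangman game
--     :return: a string that shows the picture of the game prosess
--     """
--
--     hangstr=["    _________\n　　｜　　　　｜\n　　", \
--              "　",
--              "　　　　｜\n　", \
--              "　", \
--              "　", \
--              "　", \
--              "　　　｜\n　　", \
--              "　", \
--              "　　　　｜\n　　　　　　　｜\n      　￣￣￣￣\n"]
--     failchars = ["〇","〨","乀","丿","ㄏ","𠘨","囧","丿","亅"]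
--     result = ""
--
--     if lefttime <= 6:
--         hangstr[1]=failchars[0]
--         if lefttime <=5:
--             hangstr[4] = failchars[1]
--             if lefttime <= 4:
--                 hangstr[3] = failchars[2]
--                 if lefttime <=3 :
--                     hangstr[5] = failchars[3]
--                     if lefttime <=2:
--                         hangstr[7] = failchars[4]
--                         if lefttime <= 1:
--                             hangstr[7] = failchars[5]
--                             if lefttime == 0:
--                                 hangstr[1] = failchars[6]
--                                 hangstr[3] = failchars[7]
--                                 hangstr[5] = failchars[8]
--
--     if lefttime < 8:
--         for strs in hangstr:
--             result += strs
--         return result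
--     else:
--         return "The hanging is on the way! Guesses countdown: "+str(lefttime-8)
-- ===== SOURCE B (Python) =====
-- def drawhangman(lefttime):
--     if lefttime >= 8:
--         return "The hanging is on the way! Guesses countdown: " + str(lefttime - 8)
--     hangstr = ["    _________\n　　｜　　　　｜\n　　",
--                "　",
--                "　　　　｜\n　",
--                "　",
--                "　",
--                "　",
--                "　　　｜\n　　",
--                "　",
--                "　　　　｜\n　　　　　　　｜\n      　￣￣￣￣\n"]
--     # (threshold, index, char) in A's assignment order; threshold 0 means "only when exactly 0"
--     table = [(6, 1, "〇"), (5, 4, "〨"), (4, 3, "乀"), (3, 5, "丿"),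
--              (2, 7, "ㄏ"), (1, 7, "𠘨"), (0, 1, "囧"), (0, 3, "丿"), (0, 5, "亅")]
--     for t, i, c in table:
--         if (lefttime == 0) if t == 0 else (lefttime <= t):
--             hangstr[i] = c
--     return "".join(hangstr)
-- ===== Notes on version B (the rewrite author's own statement) =====
-- stated objective: simpler
-- what changed: Replaced the six-level nested if-cascade of assignments with a single data table of (threshold, index, char) entries scanned in one loop, with an early return for the countdown message.
import Mathlib
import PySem

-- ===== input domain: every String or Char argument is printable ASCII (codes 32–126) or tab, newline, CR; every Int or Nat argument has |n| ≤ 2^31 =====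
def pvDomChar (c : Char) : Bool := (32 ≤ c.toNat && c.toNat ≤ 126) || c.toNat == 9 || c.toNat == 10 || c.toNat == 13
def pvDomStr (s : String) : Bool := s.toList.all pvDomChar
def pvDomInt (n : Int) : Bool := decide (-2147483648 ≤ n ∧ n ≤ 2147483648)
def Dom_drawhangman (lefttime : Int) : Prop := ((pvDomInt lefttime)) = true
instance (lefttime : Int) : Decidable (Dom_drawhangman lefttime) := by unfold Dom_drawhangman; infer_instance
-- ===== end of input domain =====

-- B is a table-driven one-pass rewrite of A's nested if-cascade (objective: simpler).

-- ===== PORT A =====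
-- literal transliteration of A: nested ifs mutating the list, then join or the countdown message
def drawhangman (lefttime : Int) : String :=
  let hangstr : List String :=
  ["    _________\n　　｜　　　　｜\n　　",
   "　",
   "　　　　｜\n　",
   "　",
   "　",
   "　",
   "　　　｜\n　　",
   "　",
   "　　　　｜\n　　　　　　　｜\n      　￣￣￣￣\n"]
  let failchars : List String := ["〇","〨","乀","丿","ㄏ","𠘨","囧","丿","亅"]
  let hangstr :=
    if lefttime ≤ 6 then
      let h := hangstr.set 1 failchars[0]!
      if lefttime ≤ 5 then
        let h := h.set 4 failchars[1]!
        if lefttime ≤ 4 then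
          let h := h.set 3 failchars[2]!
          if lefttime ≤ 3 then
            let h := h.set 5 failchars[3]!
            if lefttime ≤ 2 then
              let h := h.set 7 failchars[4]!
              if lefttime ≤ 1 then
                let h := h.set 7 failchars[5]!
                if lefttime = 0 then
                  ((h.set 1 failchars[6]).set 3 failchars[7]).set 5 failchars[8]
                else h
              else h
            else h
          else h
        else h
      else h
    else hangstr
  if lefttime < 8 then
    hangstr.foldl (fun result strs => result ++ strs) ""
  else
    "The hanging is on the way! Guesses countdown: " ++ PySem.Int.toStr (lefttime - 8)

-- ===== PORT B =====
-- literal transliteration of B: early return, then one fold over the (threshold, index, char) table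
def drawhangman_alt (lefttime : Int) : String :=
  if lefttime ≥ 8 then
    "The hanging is on the way! Guesses countdown: " ++ PySem.Int.toStr (lefttime - 8)
  else
    let hangstr : List String :=
    ["    _________\n　　｜　　　　｜\n　　",
     "　",
     "　　　　｜\n　",
     "　",
     "　",
     "　",
     "　　　｜\n　　",
     "　",
     "　　　　｜\n　　　　　　　｜\n      　￣￣￣￣\n"]
    let table : List (Int × Nat × String) :=
      [(6, 1, "〇"), (5, 4, "〨"), (4, 3, "乀"), (3, 5, "丿"),
       (2, 7, "ㄏ"), (1, 7, "𠘨"), (0, 1, "囧"), (0, 3, "丿"), (0, 5, "亅")]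
    let hangstr := table.foldl
      (fun h e =>
        if (if e.1 = 0 then lefttime = 0 else lefttime ≤ e.1) then h.set e.2.1 e.2.2 else h)
      hangstr
    String.join hangstr

-- ===== PRECONDITION & SPEC =====
def Spec_drawhangman (lefttime : Int) (out : String) : Prop := out = drawhangman_alt lefttime
instance (lefttime : Int) (out : String) : Decidable (Spec_drawhangman lefttime out) := by unfold Spec_drawhangman; infer_instance

-- ===== CLAIM (what is proved, stated in full; the proofs are below) =====
def Claim_equal_drawhangman : Prop := ∀ (lefttime : Int), Dom_drawhangman lefttime → Spec_drawhangman lefttime (drawhangman lefttime)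

-- ===== LEMMAS AND PROOFS =====

-- for every lefttime < 0 both programs produce the same fixed picture
theorem drawhangman_neg (lefttime : Int) (h : lefttime < 0) :
    drawhangman lefttime = drawhangman_alt lefttime := by
  have h6 : lefttime ≤ 6 := by omega
  have h5 : lefttime ≤ 5 := by omega
  have h4 : lefttime ≤ 4 := by omega
  have h3 : lefttime ≤ 3 := by omega
  have h2 : lefttime ≤ 2 := by omega
  have h1 : lefttime ≤ 1 := by omega
  have h0 : ¬ lefttime = 0 := by omega
  have h8 : lefttime < 8 := by omega
  have h8' : ¬ lefttime ≥ 8 := by omega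
  simp only [drawhangman, drawhangman_alt, List.foldl, if_pos, h6, h5, h4, h3, h2, h1,
    h0, h8, h8', if_false]
  rfl

-- ===== VERDICT (by name: the statement is the Claim_ definition above) =====
theorem drawhangman_spec : Claim_equal_drawhangman := by
  intro lefttime _
  unfold Spec_drawhangman
  by_cases hlt : lefttime < 8
  · by_cases hneg : lefttime < 0
    · exact drawhangman_neg lefttime hneg
    · interval_cases lefttime <;> rfl
  · have h8 : lefttime ≥ 8 := by omega
    simp only [drawhangman, drawhangman_alt, if_neg hlt, if_pos h8]
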